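-- pv_equiv track=rewrite | github.com/pypi-data/pypi-mirror-403 | packages/justhtml/justhtml-1.4.0.tar.gz/justhtml-1.4.0/tests/test_docs_examples.py | _matches_with_ellipsis
-- ===== SOURCE A (Python) =====
-- def _line_matches(expected_line: str, actual_line: str) -> bool:
--     if expected_line == actual_line:
--         return True
--
--     # Allow single-line wildcards using "..." inside a line.
--     if "..." not in expected_line:
--         return False
--
--     parts = expected_line.split("...")
--     pos = 0
--     for part in parts:
--         if part == "":
--             continue
--         idx = actual_line.find(part, pos)
--         if idx == -1:
--             return False
--         pos = idx + len(part)
--     return True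
--
-- def _matches_with_ellipsis(expected: str, actual: str) -> bool:
--     expected_lines = expected.splitlines()
--     actual_lines = actual.splitlines()
--
--     i = 0
--     j = 0
--     while i < len(expected_lines):
--         el = expected_lines[i]
--
--         # A line that is only "..." (ignoring surrounding whitespace) matches
--         # any number of actual lines until the next expected line matches.
--         if el.strip() == "...":
--             i += 1
--             if i >= len(expected_lines):
--                 return True
--             next_el = expected_lines[i]
--             while j < len(actual_lines) and not _line_matches(next_el, actual_lines[j]):
--                 j += 1
--             if j >= len(actual_lines):
--                 return False
--             continue
--
--         if j >= len(actual_lines):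
--             return False
--         if not _line_matches(el, actual_lines[j]):
--             return False
--         i += 1
--         j += 1
--
--     return j == len(actual_lines)
-- ===== SOURCE B (Python) =====
-- import re
--
--
-- def _line_ok(expected_line, actual_line):
--     if "..." not in expected_line:
--         return expected_line == actual_line
--     pattern = ".*".join(re.escape(c) for c in expected_line.split("...") if c)
--     return re.fullmatch(".*" + pattern + ".*", actual_line) is not None
--
--
-- def _matches_with_ellipsis(expected: str, actual: str) -> bool:
--     exp = expected.splitlines()
--     act = actual.splitlines()
--
--     i = 0
--     while i < len(exp):
--         el = exp[i]
--         i += 1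
--         if el.strip() == "...":
--             if i == len(exp):
--                 return True
--             nxt = exp[i]
--             k = next((t for t, ln in enumerate(act) if _line_ok(nxt, ln)), None)
--             if k is None:
--                 return False
--             act = act[k:]  # keep the found line: it is consumed by the next round
--         else:
--             if not act or not _line_ok(el, act[0]):
--                 return False
--             act = act[1:]
--     return not act
-- ===== Notes on version B (the rewrite author's own statement) =====
-- stated objective: idiomatic
-- what changed: B keeps a single cursor by repeatedly slicing the actual lines to a suffix instead of A's two-index loop, finds the resume point of a '...' block with one next(enumerate(...)) generator search instead of A's inner while skip, and decides each '...'-bearing line with one re.fullmatch of a '.*'-joined escaped-chunk pattern instead of A's hand-written find(part, pos) scan over the split parts.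
import Mathlib
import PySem

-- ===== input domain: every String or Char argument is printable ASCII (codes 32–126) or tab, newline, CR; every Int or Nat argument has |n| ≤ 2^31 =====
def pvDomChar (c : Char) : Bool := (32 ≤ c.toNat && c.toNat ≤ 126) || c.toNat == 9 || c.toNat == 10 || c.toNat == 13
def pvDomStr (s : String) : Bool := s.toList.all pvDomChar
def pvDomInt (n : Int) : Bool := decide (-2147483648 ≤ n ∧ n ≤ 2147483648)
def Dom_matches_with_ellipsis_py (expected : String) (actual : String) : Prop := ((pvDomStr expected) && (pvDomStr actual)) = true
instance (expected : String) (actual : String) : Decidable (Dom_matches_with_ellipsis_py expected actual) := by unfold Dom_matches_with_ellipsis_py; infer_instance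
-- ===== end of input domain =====

-- B keeps one suffix cursor into the actual lines (sliced, not indexed), locates the
-- resume point of a '...' block with a single findIdx?-style search, and decides each
-- '...'-bearing line by a regex-style backtracking full-match of the '.*'-joined chunks
-- (re.fullmatch in Source B). Objective: idiomatic; the two are proved equal everywhere.

-- ===== PORT A =====
-- inner loop of _line_matches: `for part in parts: ... find(part, pos) ...`
def lineLoopA (parts : List (List Char)) (al : List Char) (pos : Int) : Bool :=
  match parts with
  | [] => true
  | p :: rest =>
    if p = [] then lineLoopA rest al pos
    else
      let idx := PySem.Chars.findFrom al p pos
      if idx = -1 then false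
      else lineLoopA rest al (idx + (p.length : Int))

-- _line_matches (strings handled as their code-point lists)
def lineMatchesA (el al : List Char) : Bool :=
  if el = al then true
  else if PySem.Chars.isIn ("...".toList) el = false then false
  else lineLoopA (PySem.Chars.splitOn el ("...".toList)) al 0

-- the inner `while j < len(actual_lines) and not _line_matches(...)` skip, as the suffix it leaves
def skipLinesA (nextEl : List Char) (als : List (List Char)) : List (List Char) :=
  match als with
  | [] => []
  | a :: rest => if lineMatchesA nextEl a then a :: rest else skipLinesA nextEl rest

-- the outer two-pointer `while i < len(expected_lines)` loop (i, j as list suffixes)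
def loopA (els als : List (List Char)) : Bool :=
  match els with
  | [] => als.isEmpty
  | el :: rest =>
    if PySem.Chars.strip el = "...".toList then
      match rest with
      | [] => true
      | next :: _ =>
        let als' := skipLinesA next als
        if als'.isEmpty then false else loopA rest als'
    else
      match als with
      | [] => false
      | a :: atl => if lineMatchesA el a then loopA rest atl else false

def matches_with_ellipsis_py (expected : String) (actual : String) : Bool :=
  loopA ((PySem.Str.splitlines expected).map String.toList)
        ((PySem.Str.splitlines actual).map String.toList)

-- ===== PORT B =====
-- Source B's re.fullmatch(".*" + ".*".join(escaped chunks) + ".*", al): the chunks are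
-- re.escape'd, i.e. literal, so the regex is exactly a backtracking matcher for
-- "the chunks occur in this order"; ported step for step as that matcher (exact).
def bmatch (pats : List (List Char)) (s : List Char) : Bool :=
  match pats with
  | [] => true
  | c :: cs =>
    (c.isPrefixOf s && bmatch cs (s.drop c.length)) ||
    (match s with
     | [] => false
     | _ :: t => bmatch (c :: cs) t)
termination_by s.length + pats.length
decreasing_by
  all_goals simp
  all_goals omega

-- (re.escape(c) for c in expected_line.split("...") if c)
def lineChunksB (el : List Char) : List (List Char) :=
  (PySem.Chars.splitOn el ("...".toList)).filter (fun c => !c.isEmpty)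

-- Source B's _line_ok
def lineMatchesB (el al : List Char) : Bool :=
  if PySem.Chars.isIn ("...".toList) el then bmatch (lineChunksB el) al
  else el = al

-- Source B's single-cursor loop: `act` is the remaining suffix of the actual lines;
-- `next((t for t, ln in enumerate(act) if _line_ok(nxt, ln)), None)` is findIdx?.
def loopB (els act : List (List Char)) : Bool :=
  match els with
  | [] => act.isEmpty
  | el :: rest =>
    if PySem.Chars.strip el = "...".toList then
      match rest with
      | [] => true
      | nxt :: _ =>
        match act.findIdx? (fun ln => lineMatchesB nxt ln) with
        | none => false
        | some k => loopB rest (act.drop k)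
    else
      if act.isEmpty then false
      else if lineMatchesB el (act.headD []) then loopB rest act.tail else false

def matches_with_ellipsis_py_alt (expected : String) (actual : String) : Bool :=
  loopB ((PySem.Str.splitlines expected).map String.toList)
        ((PySem.Str.splitlines actual).map String.toList)

-- ===== PRECONDITION & SPEC =====
def Spec_matches_with_ellipsis_py (expected : String) (actual : String) (out : Bool) : Prop := out = matches_with_ellipsis_py_alt expected actual
instance (expected : String) (actual : String) (out : Bool) : Decidable (Spec_matches_with_ellipsis_py expected actual out) := by unfold Spec_matches_with_ellipsis_py; infer_instance

-- ===== CLAIM (what is proved, stated in full; the proofs are below) =====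
def Claim_equal_matches_with_ellipsis_py : Prop := ∀ (expected : String) (actual : String), Dom_matches_with_ellipsis_py expected actual → Spec_matches_with_ellipsis_py expected actual (matches_with_ellipsis_py expected actual)

-- ===== LEMMAS AND PROOFS =====

-- "the chunks occur, in order and disjointly, in s": the common specification both
-- line matchers are proved against.
def SeqP : List (List Char) → List Char → Prop
  | [], _ => True
  | c :: cs, s => ∃ j, c <+: s.drop j ∧ SeqP cs (s.drop (j + c.length))

theorem seqP_drop_mono (cs : List (List Char)) (s : List Char) {k m : Nat}
    (hkm : k ≤ m) (h : SeqP cs (s.drop m)) : SeqP cs (s.drop k) := by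
  cases cs with
  | nil => trivial
  | cons c cs' =>
    obtain ⟨j, h1, h2⟩ := h
    refine ⟨m - k + j, ?_, ?_⟩
    · rw [List.drop_drop] at h1 ⊢
      have e : k + (m - k + j) = m + j := by omega
      rw [e]; exact h1
    · rw [List.drop_drop] at h2 ⊢
      have e : k + (m - k + j + c.length) = m + (j + c.length) := by omega
      rw [e]; exact h2

theorem seqP_prepend (cs : List (List Char)) (u t : List Char) (h : SeqP cs t) :
    SeqP cs (u ++ t) := by
  have h' : SeqP cs ((u ++ t).drop u.length) := by
    rw [List.drop_left]; exact h
  have := seqP_drop_mono cs (u ++ t) (Nat.zero_le u.length) h'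
  simpa using this

theorem seqP_nil_chunk (cs : List (List Char)) (s : List Char) :
    SeqP ([] :: cs) s ↔ SeqP cs s := by
  constructor
  · rintro ⟨j, _, h2⟩
    simp only [List.length_nil, Nat.add_zero] at h2
    have := seqP_drop_mono cs s (Nat.zero_le j) h2
    simpa using this
  · intro h
    exact ⟨0, List.nil_prefix, by simpa using h⟩

theorem seqP_filter (parts : List (List Char)) (s : List Char) :
    SeqP (parts.filter (fun c => !c.isEmpty)) s ↔ SeqP parts s := by
  induction parts generalizing s with
  | nil => simp
  | cons c cs ih =>
    by_cases hc : c = []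
    · subst hc
      simp only [List.filter_cons, List.isEmpty_nil, Bool.not_true, Bool.false_eq_true,
        if_false]
      rw [seqP_nil_chunk]
      exact ih s
    · have : (!c.isEmpty) = true := by simp [hc]
      simp only [List.filter_cons, this, if_pos]
      show SeqP (c :: _) s ↔ SeqP (c :: cs) s
      constructor
      · rintro ⟨j, h1, h2⟩; exact ⟨j, h1, (ih _).mp h2⟩
      · rintro ⟨j, h1, h2⟩; exact ⟨j, h1, (ih _).mpr h2⟩

theorem bmatch_iff (pats : List (List Char)) (s : List Char) :
    bmatch pats s = true ↔ SeqP pats s := by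
  fun_induction bmatch pats s with
  | case1 => simp [SeqP]
  | case2 s c cs ih1 ih2 =>
    cases s with
    | nil =>
      constructor
      · intro h
        rcases Bool.or_eq_true_iff.mp h with h | h
        · obtain ⟨hpre, hrest⟩ := Bool.and_eq_true_iff.mp h
          exact ⟨0, by simpa using List.isPrefixOf_iff_prefix.mp hpre,
            by simpa using ih1.mp hrest⟩
        · simp at h
      · rintro ⟨j, h1, h2⟩
        have hc : c = [] := List.prefix_nil.mp (by simpa using h1)
        subst hc
        apply Bool.or_eq_true_iff.mpr; left
        exact Bool.and_eq_true_iff.mpr ⟨by simp, ih1.mpr (by simpa using h2)⟩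
    | cons a t =>
      have ih2' : bmatch (c :: cs) t = true ↔ SeqP (c :: cs) t := ih2
      constructor
      · intro h
        rcases Bool.or_eq_true_iff.mp h with h | h
        · obtain ⟨hpre, hrest⟩ := Bool.and_eq_true_iff.mp h
          exact ⟨0, by simpa using List.isPrefixOf_iff_prefix.mp hpre,
            by simpa using ih1.mp hrest⟩
        · obtain ⟨j, h1, h2⟩ := ih2'.mp h
          exact ⟨j + 1, by simpa [Nat.add_comm] using h1,
            by simpa [Nat.add_right_comm] using h2⟩
      · rintro ⟨j, h1, h2⟩
        cases j with
        | zero =>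
          simp only [List.drop_zero] at h1
          apply Bool.or_eq_true_iff.mpr; left
          exact Bool.and_eq_true_iff.mpr ⟨List.isPrefixOf_iff_prefix.mpr h1,
            ih1.mpr (by simpa using h2)⟩
        | succ j' =>
          apply Bool.or_eq_true_iff.mpr; right
          refine ih2'.mpr ⟨j', ?_, ?_⟩
          · simpa [Nat.add_comm] using h1
          · simpa [Nat.add_right_comm] using h2

theorem lineLoopA_iff (parts : List (List Char)) (al : List Char) : ∀ (k : Nat),
    k ≤ al.length →
    (lineLoopA parts al (k : Int) = true ↔ SeqP parts (al.drop k)) := by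
  induction parts with
  | nil => intro k hk; simp [lineLoopA, SeqP]
  | cons p rest ih =>
    intro k hk
    by_cases hp : p = []
    · subst hp
      rw [seqP_nil_chunk]
      simpa [lineLoopA] using ih k hk
    · simp only [lineLoopA, if_neg hp]
      by_cases hidx : PySem.Chars.findFrom al p (k : Int) = -1
      · have hni : ¬ p <:+: al.drop k :=
          (PySem.Chars.findFrom_natCast_eq_neg_one_iff al p k hk).mp hidx
        rw [if_pos hidx]
        constructor
        · intro h; simp at h
        · rintro ⟨j, h1, h2⟩
          exact absurd (h1.isInfix.trans (List.drop_suffix j (al.drop k)).isInfix) hni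
      · obtain ⟨hki, hpre, hmin⟩ :=
          PySem.Chars.findFrom_natCast_spec al p k hk hidx
        rw [if_neg hidx]
        set idx := PySem.Chars.findFrom al p (k : Int) with hidxdef
        have hk0 : (k : Int) ≤ idx := hki
        have hkn : k ≤ idx.toNat := by omega
        have hpl : 0 < p.length := by
          cases p with
          | nil => exact absurd rfl hp
          | cons a b => simp
        have hplen : idx.toNat + p.length ≤ al.length := by
          have := hpre.length_le
          simp [List.length_drop] at this
          omega
        have hcast : idx + (p.length : Int) = ((idx.toNat + p.length : Nat) : Int) := by
          omega
        rw [hcast, ih (idx.toNat + p.length) hplen]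
        constructor
        · intro h
          refine ⟨idx.toNat - k, ?_, ?_⟩
          · rw [List.drop_drop]
            have e : k + (idx.toNat - k) = idx.toNat := by omega
            rw [e]; exact hpre
          · rw [List.drop_drop]
            have e : k + (idx.toNat - k + p.length) = idx.toNat + p.length := by omega
            rw [e]; exact h
        · rintro ⟨j, h1, h2⟩
          rw [List.drop_drop] at h1 h2
          have hle : idx.toNat ≤ k + j := by
            by_contra hlt
            exact hmin (k + j) (by omega) (by omega) h1
          exact seqP_drop_mono rest al (by omega) h2

-- join (splitOn s sep) = s, for sep ≠ []
theorem splitOn_go_acc (sep : List Char) (fuel : Nat) :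
    ∀ (l cur : List Char) (acc : List (List Char)),
    PySem.Chars.splitOn.go sep fuel l cur acc
      = acc.reverse ++ PySem.Chars.splitOn.go sep fuel l cur [] := by
  induction fuel with
  | zero => intro l cur acc; simp [PySem.Chars.splitOn.go]
  | succ fuel ihf =>
    intro l cur acc
    cases l with
    | nil => simp [PySem.Chars.splitOn.go]
    | cons c rest =>
      rw [PySem.Chars.splitOn.go, PySem.Chars.splitOn.go]
      by_cases h : sep.isPrefixOf (c :: rest)
      · rw [if_pos h, if_pos h]
        rw [ihf, ihf (List.drop sep.length (c :: rest)) [] [cur.reverse]]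
        simp
      · rw [if_neg h, if_neg h]
        rw [ihf rest (c :: cur) acc]

theorem splitOn_go_ne_nil (sep : List Char) (fuel : Nat) :
    ∀ (l cur : List Char) (acc : List (List Char)),
    PySem.Chars.splitOn.go sep fuel l cur acc ≠ [] := by
  induction fuel with
  | zero => intro l cur acc; simp [PySem.Chars.splitOn.go]
  | succ fuel ihf =>
    intro l cur acc
    cases l with
    | nil => simp [PySem.Chars.splitOn.go]
    | cons c rest =>
      rw [PySem.Chars.splitOn.go]
      by_cases h : sep.isPrefixOf (c :: rest)
      · rw [if_pos h]; exact ihf _ _ _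
      · rw [if_neg h]; exact ihf _ _ _

theorem intercalate_cons_ne (sep x : List Char) (ys : List (List Char)) (h : ys ≠ []) :
    sep.intercalate (x :: ys) = x ++ sep ++ sep.intercalate ys := by
  cases ys with
  | nil => exact absurd rfl h
  | cons y ys' =>
    simp [List.intercalate, List.intersperse_cons₂, List.flatten_cons, List.append_assoc]

theorem splitOn_go_join (sep : List Char) (hsep : sep ≠ []) (fuel : Nat) :
    ∀ (l cur : List Char), l.length < fuel →
      sep.intercalate (PySem.Chars.splitOn.go sep fuel l cur []) = cur.reverse ++ l := by
  induction fuel with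
  | zero => intro l cur h; omega
  | succ fuel ihf =>
    intro l cur hlt
    cases l with
    | nil => simp [PySem.Chars.splitOn.go, List.intercalate]
    | cons c rest =>
      rw [PySem.Chars.splitOn.go]
      by_cases h : sep.isPrefixOf (c :: rest)
      · rw [if_pos h]
        have hdrop := List.isPrefixOf_iff_prefix.mp h
        have hslen : 0 < sep.length := List.length_pos_of_ne_nil hsep
        rw [splitOn_go_acc]
        simp only [List.reverse_cons, List.reverse_nil, List.nil_append, List.singleton_append]
        rw [intercalate_cons_ne sep _ _ (splitOn_go_ne_nil sep fuel _ _ _)]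
        · rw [ihf _ [] (by simp at hlt ⊢; omega)]
          simp only [List.reverse_nil, List.nil_append, List.append_assoc]
          congr 1
          exact List.prefix_iff_eq_append.mp hdrop
      · rw [if_neg h]
        rw [ihf rest (c :: cur) (by simp at hlt ⊢; omega)]
        simp

theorem intercalate_splitOn (s sep : List Char) (hsep : sep ≠ []) :
    sep.intercalate (PySem.Chars.splitOn s sep) = s := by
  unfold PySem.Chars.splitOn
  exact splitOn_go_join sep hsep (s.length + 1) s [] (by omega)

theorem seqP_intercalate (sep : List Char) (parts : List (List Char)) :
    SeqP parts (sep.intercalate parts) := by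
  induction parts with
  | nil => trivial
  | cons p rest ih =>
    cases rest with
    | nil =>
      refine ⟨0, ?_, ?_⟩
      · simp [List.intercalate]
      · exact trivial
    | cons q rest' =>
      rw [intercalate_cons_ne sep p _ (by simp)]
      refine ⟨0, ?_, ?_⟩
      · simp only [List.drop_zero, List.append_assoc]
        exact List.prefix_append _ _
      · simp only [Nat.zero_add, List.append_assoc]
        rw [List.drop_left]
        exact seqP_prepend _ sep _ ih

theorem lineMatches_eq (el al : List Char) : lineMatchesA el al = lineMatchesB el al := by
  unfold lineMatchesA lineMatchesB
  have hsep : ("...".toList : List Char) ≠ [] := by decide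
  have hb : bmatch (lineChunksB el) al = true
      ↔ SeqP (PySem.Chars.splitOn el ("...".toList)) al := by
    rw [bmatch_iff]
    unfold lineChunksB
    exact seqP_filter _ _
  by_cases heq : el = al
  · subst heq
    rw [if_pos rfl]
    by_cases hin : PySem.Chars.isIn ("...".toList) el = true
    · rw [if_pos hin]
      symm
      rw [hb]
      have hs := seqP_intercalate ("...".toList) (PySem.Chars.splitOn el ("...".toList))
      rwa [intercalate_splitOn el ("...".toList) hsep] at hs
    · rw [if_neg hin]
      simp
  · rw [if_neg heq]
    by_cases hin : PySem.Chars.isIn ("...".toList) el = true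
    · rw [if_neg (show ¬ (PySem.Chars.isIn ("...".toList) el = false) by simp only [Bool.not_eq_false]; exact hin),
        if_pos hin]
      apply Bool.eq_iff_iff.mpr
      rw [hb]
      have h0 := lineLoopA_iff (PySem.Chars.splitOn el ("...".toList)) al 0 (Nat.zero_le _)
      simpa using h0
    · have hfalse : PySem.Chars.isIn ("...".toList) el = false := by simpa using hin
      rw [if_pos hfalse, if_neg hin]
      simp [heq]

-- A's skip loop leaves exactly the suffix from the first matching line (or []),
-- i.e. it agrees with B's findIdx?-then-drop; the found index is in range.
theorem skip_eq_findIdx (n : List Char) (als : List (List Char)) :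
    (match als.findIdx? (fun ln => lineMatchesB n ln) with
     | none => skipLinesA n als = []
     | some k => skipLinesA n als = als.drop k ∧ k < als.length) := by
  induction als with
  | nil => simp [skipLinesA]
  | cons a rest ih =>
    rw [List.findIdx?_cons]
    by_cases h : lineMatchesB n a = true
    · simp only [h, if_pos]
      exact ⟨by simp [skipLinesA, lineMatches_eq, h], by simp⟩
    · simp only [h, Bool.false_eq_true, if_false]
      have hA : lineMatchesA n a = false := by
        rw [lineMatches_eq]; simpa using h
      cases hfi : rest.findIdx? (fun ln => lineMatchesB n ln) with
      | none =>
        rw [hfi] at ih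
        simp only [Option.map_none]
        simp [skipLinesA, hA, ih]
      | some k =>
        rw [hfi] at ih
        simp only [Option.map_some]
        refine ⟨?_, by simp; omega⟩
        simp [skipLinesA, hA, ih.1]

theorem loop_eq (els als : List (List Char)) : loopA els als = loopB els als := by
  induction els generalizing als with
  | nil => rfl
  | cons el rest ih =>
    simp only [loopA, loopB]
    split
    · cases rest with
      | nil => rfl
      | cons nxt tl =>
        cases hfi : als.findIdx? (fun ln => lineMatchesB nxt ln) with
        | none =>
          have hsk : skipLinesA nxt als = [] := by
            have h := skip_eq_findIdx nxt als; rw [hfi] at h; exact h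
          simp [hfi, hsk]
        | some k =>
          have hsk : skipLinesA nxt als = als.drop k ∧ k < als.length := by
            have h := skip_eq_findIdx nxt als; rw [hfi] at h; exact h
          have hne : (als.drop k).isEmpty = false := by
            simp [List.drop_eq_nil_iff]; omega
          simp [hfi, hsk.1, hne, ih]
    · cases als with
      | nil => rfl
      | cons a atl =>
        simp only [List.isEmpty_cons, Bool.false_eq_true, if_false, List.headD_cons,
          List.tail_cons, lineMatches_eq, ih]

-- ===== VERDICT (by name: the statement is the Claim_ definition above) =====
theorem matches_with_ellipsis_py_spec : Claim_equal_matches_with_ellipsis_py := by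
  intro expected actual _
  unfold Spec_matches_with_ellipsis_py matches_with_ellipsis_py matches_with_ellipsis_py_alt
  exact loop_eq _ _
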